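-- pv_equiv track=rewrite | github.com/Harahan/BUAA-python-programming-2022-summer | db/question_process.py | ans_process
-- ===== SOURCE A (Python) =====
-- def ans_process(answers):
--     mapping = {'A': 0b1, 'a': 0b1,
--                'B': 0b10, 'b': 0b10,
--                'C': 0b100, 'c': 0b100,
--                'D': 0b1000, 'd': 0b1000}
--     result = 0
--     for ans in answers:
--         if ans in mapping:
--             result = result | mapping[ans]
--     return result
-- ===== SOURCE B (Python) =====
-- def ans_process(answers):
--     result = 0
--     if 'A' in answers or 'a' in answers:
--         result |= 0b1
--     if 'B' in answers or 'b' in answers: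
--         result |= 0b10
--     if 'C' in answers or 'c' in answers:
--         result |= 0b100
--     if 'D' in answers or 'd' in answers:
--         result |= 0b1000
--     return result
-- ===== Notes on version B (the rewrite author's own statement) =====
-- stated objective: simpler
-- what changed: Replaced the lookup-table fold over the characters by four independent presence checks, one per output bit, OR-ed into the result.
import Mathlib
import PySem

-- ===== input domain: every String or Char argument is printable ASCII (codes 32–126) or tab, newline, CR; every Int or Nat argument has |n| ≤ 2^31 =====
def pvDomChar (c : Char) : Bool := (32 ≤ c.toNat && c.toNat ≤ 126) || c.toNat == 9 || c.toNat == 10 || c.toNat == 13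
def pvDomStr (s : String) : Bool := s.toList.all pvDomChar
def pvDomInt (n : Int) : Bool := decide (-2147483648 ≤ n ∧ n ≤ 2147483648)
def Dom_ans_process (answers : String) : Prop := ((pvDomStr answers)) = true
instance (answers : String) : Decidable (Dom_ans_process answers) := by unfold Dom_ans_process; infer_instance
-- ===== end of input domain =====

-- B replaces A's per-character lookup-table fold by four independent presence checks, one per output bit (simpler decomposition, same cost).

-- ===== PORT A =====
-- the dict literal from A (Python int `|` on these nonnegative values = Int.lor, exact)
def ansMapping : PySem.Dict Char Int :=
  PySem.Dict.ofList [('A', 1), ('a', 1), ('B', 2), ('b', 2),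
                     ('C', 4), ('c', 4), ('D', 8), ('d', 8)]

def ans_process (answers : String) : Int :=
  answers.toList.foldl
    (fun result ans =>
      if ansMapping.contains ans then Int.lor result (ansMapping.getD ans 0) else result)
    0

-- ===== PORT B =====
def ans_process_alt (answers : String) : Int :=
  let result : Int := 0
  let result := if answers.toList.contains 'A' || answers.toList.contains 'a' then Int.lor result 1 else result
  let result := if answers.toList.contains 'B' || answers.toList.contains 'b' then Int.lor result 2 else result
  let result := if answers.toList.contains 'C' || answers.toList.contains 'c' then Int.lor result 4 else result
  let result := if answers.toList.contains 'D' || answers.toList.contains 'd' then Int.lor result 8 else result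
  result

-- ===== PRECONDITION & SPEC =====
def Spec_ans_process (answers : String) (out : Int) : Prop := out = ans_process_alt answers
instance (answers : String) (out : Int) : Decidable (Spec_ans_process answers out) := by unfold Spec_ans_process; infer_instance

-- ===== CLAIM (what is proved, stated in full; the proofs are below) =====
def Claim_equal_ans_process : Prop := ∀ (answers : String), Dom_ans_process answers → Spec_ans_process answers (ans_process answers)

-- ===== LEMMAS AND PROOFS =====

-- the mask determined by four presence flags
def ansVal (a b c d : Bool) : Int :=
  (if a then 1 else 0) + (if b then 2 else 0) + (if c then 4 else 0) + (if d then 8 else 0)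

theorem ansMapping_eq : ansMapping = PySem.Dict.mk
    [('A', 1), ('a', 1), ('B', 2), ('b', 2), ('C', 4), ('c', 4), ('D', 8), ('d', 8)] := by decide

-- one step of A's fold, expressed on the four flags
theorem ans_step (a b c d : Bool) (ch : Char) :
    (if ansMapping.contains ch then Int.lor (ansVal a b c d) (ansMapping.getD ch 0) else ansVal a b c d)
    = ansVal (a || (ch == 'A' || ch == 'a')) (b || (ch == 'B' || ch == 'b'))
             (c || (ch == 'C' || ch == 'c')) (d || (ch == 'D' || ch == 'd')) := by
  by_cases h1 : ch = 'A'; · subst h1; cases a <;> cases b <;> cases c <;> cases d <;> decide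
  by_cases h2 : ch = 'a'; · subst h2; cases a <;> cases b <;> cases c <;> cases d <;> decide
  by_cases h3 : ch = 'B'; · subst h3; cases a <;> cases b <;> cases c <;> cases d <;> decide
  by_cases h4 : ch = 'b'; · subst h4; cases a <;> cases b <;> cases c <;> cases d <;> decide
  by_cases h5 : ch = 'C'; · subst h5; cases a <;> cases b <;> cases c <;> cases d <;> decide
  by_cases h6 : ch = 'c'; · subst h6; cases a <;> cases b <;> cases c <;> cases d <;> decide
  by_cases h7 : ch = 'D'; · subst h7; cases a <;> cases b <;> cases c <;> cases d <;> decide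
  by_cases h8 : ch = 'd'; · subst h8; cases a <;> cases b <;> cases c <;> cases d <;> decide
  have hc : ansMapping.contains ch = false := by
    rw [ansMapping_eq]; simp
    exact ⟨Ne.symm h1, Ne.symm h2, Ne.symm h3, Ne.symm h4, Ne.symm h5, Ne.symm h6, Ne.symm h7, Ne.symm h8⟩
  have e1 : (ch == 'A') = false := by simp [h1]
  have e2 : (ch == 'a') = false := by simp [h2]
  have e3 : (ch == 'B') = false := by simp [h3]
  have e4 : (ch == 'b') = false := by simp [h4]
  have e5 : (ch == 'C') = false := by simp [h5]
  have e6 : (ch == 'c') = false := by simp [h6]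
  have e7 : (ch == 'D') = false := by simp [h7]
  have e8 : (ch == 'd') = false := by simp [h8]
  simp [hc, e1, e2, e3, e4, e5, e6, e7, e8]

-- A's fold, characterised via the four presence flags accumulated so far
theorem ans_fold_val (l : List Char) : ∀ (a b c d : Bool),
    l.foldl (fun result ans =>
      if ansMapping.contains ans then Int.lor result (ansMapping.getD ans 0) else result)
      (ansVal a b c d)
    = ansVal (a || l.contains 'A' || l.contains 'a') (b || l.contains 'B' || l.contains 'b')
             (c || l.contains 'C' || l.contains 'c') (d || l.contains 'D' || l.contains 'd') := by
  induction l with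
  | nil => intro a b c d; simp
  | cons ch t ih =>
    intro a b c d
    simp only [List.foldl_cons, ans_step, ih, List.contains_cons]
    have hcomm : ∀ x y : Char, (x == y) = (y == x) := fun x y => by
      by_cases h : x = y <;> simp [h, Ne.symm]
    simp only [hcomm]
    simp [Bool.or_assoc, Bool.or_left_comm]

-- B's sequential ifs, characterised by the same four flags
theorem ans_alt_val (answers : String) :
    ans_process_alt answers
    = ansVal (answers.toList.contains 'A' || answers.toList.contains 'a')
             (answers.toList.contains 'B' || answers.toList.contains 'b')
             (answers.toList.contains 'C' || answers.toList.contains 'c')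
             (answers.toList.contains 'D' || answers.toList.contains 'd') := by
  unfold ans_process_alt
  cases hA : (answers.toList.contains 'A' || answers.toList.contains 'a') <;>
  cases hB : (answers.toList.contains 'B' || answers.toList.contains 'b') <;>
  cases hC : (answers.toList.contains 'C' || answers.toList.contains 'c') <;>
  cases hD : (answers.toList.contains 'D' || answers.toList.contains 'd') <;>
  simp [ansVal] <;> decide

-- ===== VERDICT (by name: the statement is the Claim_ definition above) =====
theorem ans_process_spec : Claim_equal_ans_process := by
  intro answers _
  unfold Spec_ans_process ans_process
  rw [ans_alt_val]
  have h := ans_fold_val answers.toList false false false false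
  simpa [ansVal] using h
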